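-- pv_equiv track=rewrite | github.com/hollowsocks/aws-data-platform-and-extraction | data-ingestion/triplewhale/src/triplewhale_ingestion/sql_loader.py | _region_from_ad_row
-- ===== SOURCE A (Python) =====
-- from typing import Dict, Iterable, List, Optional, Tuple
--
-- REGION_TOKEN_SETS: Dict[str, set[str]] = {
--     "AU": {"AU", "AUS", "AUSTRALIA"},
--     "UK": {"UK", "GB", "UNITEDKINGDOM"},
--     "CA": {"CA", "CAN", "CANADA"},
--     "US": {"US", "USA", "UNITEDSTATES"},
-- }
--
-- def _region_from_ad_row(row: Dict[str, object], account_map: Dict[str, str]) -> Optional[str]: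
--     account_id = row.get("account_id")
--     if isinstance(account_id, str):
--         region = account_map.get(account_id)
--         if region:
--             return region
--
--     text_parts = [row.get("campaign_name"), row.get("adset_name"), row.get("ad_name")]
--     tokens = _tokenize_ad_text(text_parts)
--
--     for region_code in ("AU", "UK", "CA", "US"):
--         if tokens & REGION_TOKEN_SETS[region_code]:
--             return region_code if region_code != "GB" else "UK"
--
--     return "US"
--
-- def _tokenize_ad_text(parts: Iterable[Optional[str]]) -> set[str]:
--     combined = " ".join(str(part) for part in parts if part)
--     normalized = "".join(ch if ch.isalnum() else " " for ch in combined.upper())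
--     return set(token for token in normalized.split() if token)
-- ===== SOURCE B (Python) =====
-- # B: replaces the four per-region set intersections with a single pass over the
-- # token set using an inverted token->(priority, region) map, tracking the
-- # minimum-priority hit; same account_map early return and tokenization.
--
-- _TOKEN_TO_REGION = {
--     "AU": (0, "AU"), "AUS": (0, "AU"), "AUSTRALIA": (0, "AU"),
--     "UK": (1, "UK"), "GB": (1, "UK"), "UNITEDKINGDOM": (1, "UK"),
--     "CA": (2, "CA"), "CAN": (2, "CA"), "CANADA": (2, "CA"),
--     "US": (3, "US"), "USA": (3, "US"), "UNITEDSTATES": (3, "US"),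
-- }
--
-- def _tokenize_ad_text(parts):
--     combined = " ".join(str(part) for part in parts if part)
--     normalized = "".join(ch if ch.isalnum() else " " for ch in combined.upper())
--     return set(token for token in normalized.split() if token)
--
-- def _region_from_ad_row(row, account_map):
--     account_id = row.get("account_id")
--     if isinstance(account_id, str):
--         region = account_map.get(account_id)
--         if region:
--             return region
--
--     tokens = _tokenize_ad_text([row.get("campaign_name"), row.get("adset_name"), row.get("ad_name")])
--
--     best = (4, "US")
--     for token in tokens:
--         hit = _TOKEN_TO_REGION.get(token)
--         if hit is not None and hit[0] < best[0]:
--             best = hit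
--     return best[1]
-- ===== Notes on version B (the rewrite author's own statement) =====
-- stated objective: idiomatic
-- what changed: The four per-region set intersections in priority order are replaced by one pass over the token set with an inverted token->(priority, region) map, keeping the minimum-priority hit.
import Mathlib
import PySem

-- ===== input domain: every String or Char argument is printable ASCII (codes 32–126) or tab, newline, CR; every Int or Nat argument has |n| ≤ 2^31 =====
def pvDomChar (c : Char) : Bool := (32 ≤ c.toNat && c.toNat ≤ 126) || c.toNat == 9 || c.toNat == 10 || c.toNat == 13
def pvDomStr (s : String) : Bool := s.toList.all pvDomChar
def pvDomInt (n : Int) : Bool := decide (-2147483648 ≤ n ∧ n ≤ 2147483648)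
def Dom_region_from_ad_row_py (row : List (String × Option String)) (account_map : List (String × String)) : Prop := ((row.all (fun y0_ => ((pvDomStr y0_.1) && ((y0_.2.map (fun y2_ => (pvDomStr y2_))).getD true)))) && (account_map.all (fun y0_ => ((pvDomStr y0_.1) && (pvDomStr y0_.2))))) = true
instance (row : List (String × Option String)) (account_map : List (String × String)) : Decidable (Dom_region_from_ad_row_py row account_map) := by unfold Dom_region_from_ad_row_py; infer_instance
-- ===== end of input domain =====

-- B replaces A's four priority-ordered set intersections by one pass over the token set
-- with an inverted token->(priority, region) map tracking the minimum-priority hit (idiomatic).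

-- shared helper: _tokenize_ad_text appears verbatim in both Source A and Source B
def pyTokenizeAdText (parts : List (Option String)) : PySem.Set String :=
  let combined := PySem.Str.join " " (parts.filterMap (fun p =>
    match p with
    | some s => if s = "" then none else some s
    | none => none))
  let normalized := String.ofList ((PySem.Str.upper combined).toList.map
    (fun ch => if PySem.Chars.isalnum ch then ch else ' '))
  PySem.Set.ofList ((PySem.Str.split₀ normalized).filter (fun t => t ≠ ""))

-- ===== PORT A =====
def pvRegionTokenSets : PySem.Dict String (PySem.Set String) :=
  PySem.Dict.mk
    [("AU", PySem.Set.ofList ["AU", "AUS", "AUSTRALIA"]),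
     ("UK", PySem.Set.ofList ["UK", "GB", "UNITEDKINGDOM"]),
     ("CA", PySem.Set.ofList ["CA", "CAN", "CANADA"]),
     ("US", PySem.Set.ofList ["US", "USA", "UNITEDSTATES"])]

-- A's region loop over the token set ('tokens & S' is truthy iff the intersection is non-empty)
def pvTokenBranchA (tokens : PySem.Set String) : Option String :=
  match ["AU", "UK", "CA", "US"].find? (fun code =>
      decide (PySem.Set.inter tokens (PySem.Dict.getD pvRegionTokenSets code []) ≠ [])) with
  | some code => some (if code ≠ "GB" then code else "UK")
  | none => some "US"

def region_from_ad_row_py (row : List (String × Option String)) (account_map : List (String × String)) : Option String :=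
  let rest : Option String := pvTokenBranchA (pyTokenizeAdText
    [(PySem.Dict.get? (PySem.Dict.mk row) "campaign_name").join,
     (PySem.Dict.get? (PySem.Dict.mk row) "adset_name").join,
     (PySem.Dict.get? (PySem.Dict.mk row) "ad_name").join])
  match (PySem.Dict.get? (PySem.Dict.mk row) "account_id").join with
  | some account_id =>
    match PySem.Dict.get? (PySem.Dict.mk account_map) account_id with
    | some region => if region ≠ "" then some region else rest
    | none => rest
  | none => rest

-- ===== PORT B =====
def pvTokenToRegion : PySem.Dict String (Int × String) :=
  PySem.Dict.mk
    [("AU", (0, "AU")), ("AUS", (0, "AU")), ("AUSTRALIA", (0, "AU")),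
     ("UK", (1, "UK")), ("GB", (1, "UK")), ("UNITEDKINGDOM", (1, "UK")),
     ("CA", (2, "CA")), ("CAN", (2, "CA")), ("CANADA", (2, "CA")),
     ("US", (3, "US")), ("USA", (3, "US")), ("UNITEDSTATES", (3, "US"))]

-- B's region choice: one min-priority pass over the token set
def pvTokenBranchB (tokens : PySem.Set String) : Option String :=
  let best := tokens.foldl (fun b t =>
    match PySem.Dict.get? pvTokenToRegion t with
    | some hit => if hit.1 < b.1 then hit else b
    | none => b) ((4 : Int), "US")
  some best.2

def region_from_ad_row_py_alt (row : List (String × Option String)) (account_map : List (String × String)) : Option String :=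
  let rest : Option String := pvTokenBranchB (pyTokenizeAdText
    [(PySem.Dict.get? (PySem.Dict.mk row) "campaign_name").join,
     (PySem.Dict.get? (PySem.Dict.mk row) "adset_name").join,
     (PySem.Dict.get? (PySem.Dict.mk row) "ad_name").join])
  match (PySem.Dict.get? (PySem.Dict.mk row) "account_id").join with
  | some account_id =>
    match PySem.Dict.get? (PySem.Dict.mk account_map) account_id with
    | some region => if region ≠ "" then some region else rest
    | none => rest
  | none => rest

-- ===== PRECONDITION & SPEC =====
def Spec_region_from_ad_row_py (row : List (String × Option String)) (account_map : List (String × String)) (out : Option String) : Prop := out = region_from_ad_row_py_alt row account_map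
instance (row : List (String × Option String)) (account_map : List (String × String)) (out : Option String) : Decidable (Spec_region_from_ad_row_py row account_map out) := by unfold Spec_region_from_ad_row_py; infer_instance

-- ===== CLAIM (what is proved, stated in full; the proofs are below) =====
def Claim_equal_region_from_ad_row_py : Prop := ∀ (row : List (String × Option String)) (account_map : List (String × String)), Dom_region_from_ad_row_py row account_map → Spec_region_from_ad_row_py row account_map (region_from_ad_row_py row account_map)

-- ===== LEMMAS AND PROOFS =====

-- priority of a token under B's inverted map (4 = no region token)
def pvPri (t : String) : Int :=
  match PySem.Dict.get? pvTokenToRegion t with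
  | some hit => hit.1
  | none => 4

-- canonical accumulator state for a given priority
def pvSt (i : Int) : Int × String :=
  (i, if i = 0 then "AU" else if i = 1 then "UK" else if i = 2 then "CA" else "US")

def pvAllTokens : List String :=
  ["AU", "AUS", "AUSTRALIA", "UK", "GB", "UNITEDKINGDOM", "CA", "CAN", "CANADA", "US", "USA", "UNITEDSTATES"]

theorem pvHit_none {t : String} (h : t ∉ pvAllTokens) :
    PySem.Dict.get? pvTokenToRegion t = none := by
  rw [PySem.Dict.get?_eq_none_iff_not_mem_keys]
  simpa [pvTokenToRegion, PySem.Dict.keys_mk, pvAllTokens] using h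

theorem pvHit_shape {t : String} {hit : Int × String}
    (h : PySem.Dict.get? pvTokenToRegion t = some hit) :
    hit = pvSt hit.1 ∧ 0 ≤ hit.1 ∧ hit.1 ≤ 3 ∧ pvPri t = hit.1 := by
  by_cases hm : t ∈ pvAllTokens
  · have hp : pvPri t = hit.1 := by simp [pvPri, h]
    refine ⟨?_, ?_, ?_, hp⟩ <;>
      fin_cases hm <;>
      simp_all [pvTokenToRegion, PySem.Dict.get?_mk_cons, pvSt] <;> (cases h; decide)
  · rw [pvHit_none hm] at h; cases h

theorem pvPri_nonneg (t : String) : 0 ≤ pvPri t := by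
  rcases hg : PySem.Dict.get? pvTokenToRegion t with _ | hit
  · simp [pvPri, hg]
  · have := (pvHit_shape hg).2.1
    simp [pvPri, hg, this]

theorem pvPri_of_mem_S0 {t : String} (h : t ∈ ["AU", "AUS", "AUSTRALIA"]) : pvPri t = 0 := by
  fin_cases h <;> decide
theorem pvPri_of_mem_S1 {t : String} (h : t ∈ ["UK", "GB", "UNITEDKINGDOM"]) : pvPri t = 1 := by
  fin_cases h <;> decide
theorem pvPri_of_mem_S2 {t : String} (h : t ∈ ["CA", "CAN", "CANADA"]) : pvPri t = 2 := by
  fin_cases h <;> decide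

theorem pvMem_of_pri {t : String} {k : Int} (hk : pvPri t = k) :
    (k = 0 → t ∈ ["AU", "AUS", "AUSTRALIA"]) ∧
    (k = 1 → t ∈ ["UK", "GB", "UNITEDKINGDOM"]) ∧
    (k = 2 → t ∈ ["CA", "CAN", "CANADA"]) ∧
    (k = 3 → t ∈ ["US", "USA", "UNITEDSTATES"]) := by
  by_cases hm : t ∈ pvAllTokens
  · subst hk
    fin_cases hm <;> refine ⟨?_, ?_, ?_, ?_⟩ <;> intro hq <;> first | decide | (exfalso; revert hq; decide)
  · have : pvPri t = 4 := by simp [pvPri, pvHit_none hm]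
    rw [this] at hk
    refine ⟨?_, ?_, ?_, ?_⟩ <;> intro hq <;> (exfalso; omega)

-- B's fold over any token list, started in a canonical state, stays canonical
theorem pvFold_eq (ts : List String) : ∀ (i : Int), i ≤ 4 →
    ts.foldl (fun b t =>
      match PySem.Dict.get? pvTokenToRegion t with
      | some hit => if hit.1 < b.1 then hit else b
      | none => b) (pvSt i)
    = pvSt (ts.foldl (fun j t => min j (pvPri t)) i) := by
  induction ts with
  | nil => intro i _; rfl
  | cons t ts ih =>
    intro i hi
    simp only [List.foldl_cons]
    have hstep :
        (match PySem.Dict.get? pvTokenToRegion t with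
          | some hit => if hit.1 < (pvSt i).1 then hit else pvSt i
          | none => pvSt i) = pvSt (min i (pvPri t)) := by
      rcases hg : PySem.Dict.get? pvTokenToRegion t with _ | hit
      · have h4 : pvPri t = 4 := by simp [pvPri, hg]
        simp [h4, min_eq_left hi]
      · obtain ⟨hs, _, _, hp⟩ := pvHit_shape hg
        have hfst : (pvSt i).1 = i := rfl
        rw [hp] at *
        by_cases hlt : hit.1 < i
        · simp [hfst, hlt, min_eq_right (le_of_lt hlt), ← hs]
        · simp [hfst, hlt, min_eq_left (by omega : i ≤ hit.1)]
    rw [hstep]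
    exact ih _ (le_trans (min_le_left _ _) hi)

theorem pvMin_map (ts : List String) (i : Int) :
    ts.foldl (fun j t => min j (pvPri t)) i = (ts.map pvPri).foldl min i := by
  rw [List.foldl_map]

theorem pvMin_lb (l : List Int) : ∀ (a c : Int), c ≤ a → (∀ x ∈ l, c ≤ x) →
    c ≤ l.foldl min a := by
  induction l with
  | nil => intro a c ha _; simpa using ha
  | cons x l ih =>
    intro a c ha h
    simp only [List.foldl_cons]
    exact ih _ _ (le_min ha (h x (List.mem_cons_self))) (fun y hy => h y (List.mem_cons_of_mem _ hy))

-- the core: A's priority-ordered intersection chain equals B's min fold, for any token list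
theorem pvCore (ts : List String) :
    (match ["AU", "UK", "CA", "US"].find? (fun code =>
        decide (PySem.Set.inter ts (PySem.Dict.getD pvRegionTokenSets code []) ≠ [])) with
      | some code => some (if code ≠ "GB" then code else "UK")
      | none => some "US")
    = some (pvSt (ts.foldl (fun j t => min j (pvPri t)) 4)).2 := by
  have hne : ∀ (S : PySem.Set String),
      (PySem.Set.inter ts S ≠ []) ↔ ∃ t ∈ ts, t ∈ S := by
    intro S
    rw [← List.isEmpty_eq_false_iff, List.isEmpty_eq_false_iff_exists_mem]
    constructor
    · rintro ⟨x, hx⟩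
      exact ⟨x, ((PySem.Set.mem_inter ts S x).mp hx).1, ((PySem.Set.mem_inter ts S x).mp hx).2⟩
    · rintro ⟨t, ht, htS⟩
      exact ⟨t, (PySem.Set.mem_inter ts S t).mpr ⟨ht, htS⟩⟩
  set J := ts.foldl (fun j t => min j (pvPri t)) 4 with hJ
  have hJ4 : J ≤ 4 := by
    rw [hJ, pvMin_map]; exact (PySem.List.foldl_min_le _ _).1
  have hJmem : ∀ t ∈ ts, J ≤ pvPri t := by
    intro t ht
    rw [hJ, pvMin_map]
    exact (PySem.List.foldl_min_le _ _).2 _ (List.mem_map_of_mem ht)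
  have hcond : ∀ (c : String) (S : PySem.Set String), PySem.Dict.getD pvRegionTokenSets c [] = S →
      ((decide (PySem.Set.inter ts (PySem.Dict.getD pvRegionTokenSets c []) ≠ []) = true) ↔ ∃ t ∈ ts, t ∈ S) := by
    intro c S hS; rw [hS, decide_eq_true_iff, hne]
  have hfp : ∀ (c : String) (l : List String),
      decide (PySem.Set.inter ts (PySem.Dict.getD pvRegionTokenSets c []) ≠ []) = true →
      List.find? (fun code => decide (PySem.Set.inter ts (PySem.Dict.getD pvRegionTokenSets code []) ≠ [])) (c :: l) = some c :=
    fun _ _ h => List.find?_cons_of_pos h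
  have hfn : ∀ (c : String) (l : List String),
      ¬ (decide (PySem.Set.inter ts (PySem.Dict.getD pvRegionTokenSets c []) ≠ []) = true) →
      List.find? (fun code => decide (PySem.Set.inter ts (PySem.Dict.getD pvRegionTokenSets code []) ≠ [])) (c :: l) = List.find? (fun code => decide (PySem.Set.inter ts (PySem.Dict.getD pvRegionTokenSets code []) ≠ [])) l :=
    fun _ _ h => List.find?_cons_of_neg h
  by_cases h0 : ∃ t ∈ ts, t ∈ (PySem.Set.ofList ["AU", "AUS", "AUSTRALIA"] : List String)
  · obtain ⟨t, ht, htS⟩ := h0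
    have hp : pvPri t = 0 := pvPri_of_mem_S0 (by simpa [PySem.Set.mem_ofList] using htS)
    have hle : J ≤ 0 := hp ▸ hJmem t ht
    have hge : 0 ≤ J := by
      rw [hJ, pvMin_map]
      exact pvMin_lb _ _ _ (by norm_num) (by intro x hx; obtain ⟨u, hu, rfl⟩ := List.mem_map.mp hx; exact pvPri_nonneg u)
    have hJ0 : J = 0 := le_antisymm hle hge
    rw [hfp "AU" _ ((hcond "AU" _ rfl).mpr ⟨t, ht, htS⟩)]
    simp [hJ0, pvSt]
  · have hlb0 : ∀ u ∈ ts, 1 ≤ pvPri u := by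
      intro u hu
      have h0le := pvPri_nonneg u
      rcases eq_or_lt_of_le h0le with h | h
      · exact absurd ((pvMem_of_pri h.symm).1 rfl)
          (fun hm => h0 ⟨u, hu, by simpa [PySem.Set.mem_ofList] using hm⟩)
      · omega
    have hge1 : 1 ≤ J := by
      rw [hJ, pvMin_map]
      exact pvMin_lb _ _ _ (by norm_num) (by intro x hx; obtain ⟨u, hu, rfl⟩ := List.mem_map.mp hx; exact hlb0 u hu)
    rw [hfn "AU" _ (fun hc => h0 ((hcond "AU" _ rfl).mp hc))]
    by_cases h1 : ∃ t ∈ ts, t ∈ (PySem.Set.ofList ["UK", "GB", "UNITEDKINGDOM"] : List String)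
    · obtain ⟨t, ht, htS⟩ := h1
      have hp : pvPri t = 1 := pvPri_of_mem_S1 (by simpa [PySem.Set.mem_ofList] using htS)
      have hle : J ≤ 1 := hp ▸ hJmem t ht
      have hJ1 : J = 1 := le_antisymm hle hge1
      rw [hfp "UK" _ ((hcond "UK" _ rfl).mpr ⟨t, ht, htS⟩)]
      simp [hJ1, pvSt]
    · have hlb1 : ∀ u ∈ ts, 2 ≤ pvPri u := by
        intro u hu
        have h1le := hlb0 u hu
        rcases eq_or_lt_of_le h1le with h | h
        · exact absurd ((pvMem_of_pri h.symm).2.1 rfl)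
            (fun hm => h1 ⟨u, hu, by simpa [PySem.Set.mem_ofList] using hm⟩)
        · omega
      have hge2 : 2 ≤ J := by
        rw [hJ, pvMin_map]
        exact pvMin_lb _ _ _ (by norm_num) (by intro x hx; obtain ⟨u, hu, rfl⟩ := List.mem_map.mp hx; exact hlb1 u hu)
      rw [hfn "UK" _ (fun hc => h1 ((hcond "UK" _ rfl).mp hc))]
      by_cases h2 : ∃ t ∈ ts, t ∈ (PySem.Set.ofList ["CA", "CAN", "CANADA"] : List String)
      · obtain ⟨t, ht, htS⟩ := h2
        have hp : pvPri t = 2 := pvPri_of_mem_S2 (by simpa [PySem.Set.mem_ofList] using htS)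
        have hle : J ≤ 2 := hp ▸ hJmem t ht
        have hJ2 : J = 2 := le_antisymm hle hge2
        rw [hfp "CA" _ ((hcond "CA" _ rfl).mpr ⟨t, ht, htS⟩)]
        simp [hJ2, pvSt]
      · have hlb2 : ∀ u ∈ ts, 3 ≤ pvPri u := by
          intro u hu
          have h2le := hlb1 u hu
          rcases eq_or_lt_of_le h2le with h | h
          · exact absurd ((pvMem_of_pri h.symm).2.2.1 rfl)
              (fun hm => h2 ⟨u, hu, by simpa [PySem.Set.mem_ofList] using hm⟩)
          · omega
        have hge3 : 3 ≤ J := by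
          rw [hJ, pvMin_map]
          exact pvMin_lb _ _ _ (by norm_num) (by intro x hx; obtain ⟨u, hu, rfl⟩ := List.mem_map.mp hx; exact hlb2 u hu)
        rw [hfn "CA" _ (fun hc => h2 ((hcond "CA" _ rfl).mp hc))]
        by_cases h3 : ∃ t ∈ ts, t ∈ (PySem.Set.ofList ["US", "USA", "UNITEDSTATES"] : List String)
        · rw [hfp "US" _ ((hcond "US" _ rfl).mpr h3)]
          have : J = 3 ∨ J = 4 := by omega
          rcases this with h | h <;> simp [h, pvSt]
        · rw [hfn "US" _ (fun hc => h3 ((hcond "US" _ rfl).mp hc))]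
          have : J = 3 ∨ J = 4 := by omega
          rcases this with h | h <;> simp [h, pvSt]

-- ===== VERDICT (by name: the statement is the Claim_ definition above) =====
set_option maxHeartbeats 1000000 in
theorem region_from_ad_row_py_spec : Claim_equal_region_from_ad_row_py := by
  intro row account_map _
  show region_from_ad_row_py row account_map = region_from_ad_row_py_alt row account_map
  have hrest : ∀ (ts : PySem.Set String), pvTokenBranchA ts = pvTokenBranchB ts := by
    intro ts
    unfold pvTokenBranchA pvTokenBranchB
    have h4 : ((4 : Int), ("US" : String)) = pvSt 4 := by simp [pvSt]
    rw [h4, pvFold_eq _ 4 le_rfl, pvCore]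
  cases hacc : (PySem.Dict.get? (PySem.Dict.mk row) "account_id").join with
  | none => simp only [region_from_ad_row_py, region_from_ad_row_py_alt, hacc]; exact hrest _
  | some aid =>
    cases hreg : PySem.Dict.get? (PySem.Dict.mk account_map) aid with
    | none => simp only [region_from_ad_row_py, region_from_ad_row_py_alt, hacc, hreg]; exact hrest _
    | some region =>
      by_cases hr : region = ""
      · simp only [region_from_ad_row_py, region_from_ad_row_py_alt, hacc, hreg, hr, ne_eq, not_true_eq_false, if_false]
        exact hrest _
      · simp only [region_from_ad_row_py, region_from_ad_row_py_alt, hacc, hreg, ne_eq, hr, not_false_eq_true, if_true]
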